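-- pv_equiv track=rewrite | github.com/GregoryKogan/hexqr | Modules/scaner.py | get_avoid_indexes
-- ===== SOURCE A (Python) =====
-- def index_by_position(row, position, n):
--     cells_at_current_row = n * 2 + 1
--     current_pos = 1
--     current_row = 1
--     current_index = 1
--     if current_row == row and current_pos == position:
--         return current_index
--     while current_index < n*n*6:
--         current_index += 1
--         current_pos += 1
--         if current_pos > cells_at_current_row:
--             current_pos = 1
--             current_row += 1
--             if current_row <= n:
--                 cells_at_current_row += 2
--             elif current_row != n + 1:
--                 cells_at_current_row -= 2
--         if current_row == row and current_pos == position: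
--             return current_index
--     return None
--
-- def get_avoid_indexes(n):
--     avoid_positions = [
--         (1, 1),
--         (1, 2),
--         (1, 2 * n),
--         (1, 2 * n + 1),
--         (n, 1),
--         (n + 1, 1),
--         (n, 4 * n - 1),
--         (n + 1, 4 * n - 1),
--         (2 * n, 1),
--         (2 * n, 2),
--         (2 * n, 2 * n),
--         (2 * n, 2 * n + 1),
--         (n, 2 * n - 1),
--         (n, 2 * n),
--         (n, 2 * n + 1),
--         (n + 1, 2 * n - 1),
--         (n + 1, 2 * n),
--         (n + 1, 2 * n + 1)
--     ]
--     avoid_indexes = []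
--     for position in avoid_positions:
--         index = index_by_position(position[0], position[1], n)
--         avoid_indexes.append(index)
--     return avoid_indexes
-- ===== SOURCE B (Python) =====
-- def get_avoid_indexes(n):
--     # Closed form: row r (1 <= r <= 2n) has cells(r) cells; cell (r, p) has
--     # linear index prefix(r-1) + p, where prefix(r) = cells(1) + ... + cells(r).
--     def cells(r):
--         return 2 * n + 2 * r - 1 if r <= n else 6 * n + 1 - 2 * r
--
--     def prefix(r):
--         return 2 * n * r + r * r if r <= n else 3 * n * n + (r - n) * (5 * n - r)
--
--     def index(r, p):
--         if 1 <= r <= 2 * n and 1 <= p <= cells(r):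
--             return prefix(r - 1) + p
--         return None
--
--     avoid_positions = [
--         (1, 1),
--         (1, 2),
--         (1, 2 * n),
--         (1, 2 * n + 1),
--         (n, 1),
--         (n + 1, 1),
--         (n, 4 * n - 1),
--         (n + 1, 4 * n - 1),
--         (2 * n, 1),
--         (2 * n, 2),
--         (2 * n, 2 * n),
--         (2 * n, 2 * n + 1),
--         (n, 2 * n - 1),
--         (n, 2 * n),
--         (n, 2 * n + 1),
--         (n + 1, 2 * n - 1),
--         (n + 1, 2 * n),
--         (n + 1, 2 * n + 1)
--     ]
--     return [index(r, p) for r, p in avoid_positions]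
-- ===== Notes on version B (the rewrite author's own statement) =====
-- stated objective: faster
-- what changed: A finds each position's linear index by simulating the scan cell by cell over the whole 6n^2-cell grid; B computes it in O(1) with a closed-form prefix-sum formula for the number of cells before each row.
import Mathlib
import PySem

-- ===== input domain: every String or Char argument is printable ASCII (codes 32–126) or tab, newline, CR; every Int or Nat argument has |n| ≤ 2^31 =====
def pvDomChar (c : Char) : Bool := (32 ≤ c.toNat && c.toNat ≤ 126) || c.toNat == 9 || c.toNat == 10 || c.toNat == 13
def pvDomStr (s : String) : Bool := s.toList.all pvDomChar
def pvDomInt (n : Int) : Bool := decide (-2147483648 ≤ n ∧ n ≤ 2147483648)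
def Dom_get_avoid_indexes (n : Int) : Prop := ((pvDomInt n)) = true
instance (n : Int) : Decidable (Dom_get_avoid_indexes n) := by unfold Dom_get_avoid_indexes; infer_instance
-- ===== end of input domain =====

-- B replaces A's O(n^2) cell-by-cell scan per position with a closed-form
-- prefix-sum index formula per row (O(1) per position).

-- ===== PORT A =====
-- the while-loop of index_by_position; fuel = remaining iterations (= n*n*6 - current_index)
def ibpAux (row position n : Int) : Nat → Int → Int → Int → Int → Option Int
  | 0, _, _, _, _ => none
  | fuel + 1, idx, pos, r, cells =>
    if pos + 1 > cells then
      if r + 1 = row ∧ (1 : Int) = position then some (idx + 1)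
      else
        ibpAux row position n fuel (idx + 1) 1 (r + 1)
          (if r + 1 ≤ n then cells + 2 else if r + 1 ≠ n + 1 then cells - 2 else cells)
    else
      if r = row ∧ pos + 1 = position then some (idx + 1)
      else ibpAux row position n fuel (idx + 1) (pos + 1) r cells

def index_by_position (row position n : Int) : Option Int :=
  if (1 : Int) = row ∧ (1 : Int) = position then some 1
  else ibpAux row position n (n * n * 6 - 1).toNat 1 1 1 (n * 2 + 1)

def get_avoid_indexes (n : Int) : List (Option Int) :=
  let avoid_positions : List (Int × Int) :=
    [(1, 1), (1, 2), (1, 2 * n), (1, 2 * n + 1), (n, 1), (n + 1, 1),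
     (n, 4 * n - 1), (n + 1, 4 * n - 1), (2 * n, 1), (2 * n, 2),
     (2 * n, 2 * n), (2 * n, 2 * n + 1), (n, 2 * n - 1), (n, 2 * n),
     (n, 2 * n + 1), (n + 1, 2 * n - 1), (n + 1, 2 * n), (n + 1, 2 * n + 1)]
  avoid_positions.foldl
    (fun acc position => acc ++ [index_by_position position.1 position.2 n]) []

-- ===== PORT B =====
def cellsB (n r : Int) : Int := if r ≤ n then 2 * n + 2 * r - 1 else 6 * n + 1 - 2 * r

def prefixB (n r : Int) : Int :=
  if r ≤ n then 2 * n * r + r * r else 3 * n * n + (r - n) * (5 * n - r)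

def indexB (n r p : Int) : Option Int :=
  if 1 ≤ r ∧ r ≤ 2 * n ∧ 1 ≤ p ∧ p ≤ cellsB n r then some (prefixB n (r - 1) + p)
  else none

def get_avoid_indexes_alt (n : Int) : List (Option Int) :=
  ([(1, 1), (1, 2), (1, 2 * n), (1, 2 * n + 1), (n, 1), (n + 1, 1),
    (n, 4 * n - 1), (n + 1, 4 * n - 1), (2 * n, 1), (2 * n, 2),
    (2 * n, 2 * n), (2 * n, 2 * n + 1), (n, 2 * n - 1), (n, 2 * n),
    (n, 2 * n + 1), (n + 1, 2 * n - 1), (n + 1, 2 * n), (n + 1, 2 * n + 1)] :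
    List (Int × Int)).map (fun rp => indexB n rp.1 rp.2)

-- ===== PRECONDITION & SPEC =====
-- Pre_ restricts to the natural domain of the function: n is the hex-grid size
-- and must be positive; for non-positive n A's scan still returns values, but they
-- are artefacts of simulating a grid that does not exist (outside the natural domain).
def Pre_get_avoid_indexes (n : Int) : Prop := 1 ≤ n
instance (n : Int) : Decidable (Pre_get_avoid_indexes n) := by
  unfold Pre_get_avoid_indexes; infer_instance

def pvWitness_get_avoid_indexes : Int := 2

def Spec_get_avoid_indexes (n : Int) (out : List (Option Int)) : Prop := out = get_avoid_indexes_alt n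
instance (n : Int) (out : List (Option Int)) : Decidable (Spec_get_avoid_indexes n out) := by unfold Spec_get_avoid_indexes; infer_instance

-- ===== CLAIM (what is proved, stated in full; the proofs are below) =====
def Claim_equal_get_avoid_indexes : Prop := ∀ (n : Int), Dom_get_avoid_indexes n → Pre_get_avoid_indexes n → Spec_get_avoid_indexes n (get_avoid_indexes n)

-- ===== LEMMAS AND PROOFS =====

lemma cells_pos {n r : Int} (_hn : 1 ≤ n) (h1 : 1 ≤ r) (h2 : r ≤ 2 * n) :
    1 ≤ cellsB n r := by
  unfold cellsB; split_ifs <;> omega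

lemma cells_step {n r : Int} :
    (if r + 1 ≤ n then cellsB n r + 2 else if r + 1 ≠ n + 1 then cellsB n r - 2 else cellsB n r)
      = cellsB n (r + 1) := by
  unfold cellsB; split_ifs <;> omega

lemma prefix_zero {n : Int} (hn : 1 ≤ n) : prefixB n 0 = 0 := by
  unfold prefixB; rw [if_pos (by omega)]; ring

lemma prefix_rec {n r : Int} (h1 : 1 ≤ r) :
    prefixB n (r - 1) + cellsB n r = prefixB n r := by
  unfold prefixB cellsB
  by_cases h : r ≤ n
  · rw [if_pos (by omega), if_pos h, if_pos h]; ring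
  · by_cases h' : r - 1 ≤ n
    · have hr : r = n + 1 := by omega
      rw [if_pos h', if_neg (by omega), if_neg (by omega)]; subst hr; ring
    · rw [if_neg (by omega), if_neg (by omega), if_neg (by omega)]; ring

lemma prefix_mono {n a b : Int} (_hn : 1 ≤ n) (ha : 0 ≤ a) (hab : a ≤ b) (hb : b ≤ 2 * n) :
    prefixB n a ≤ prefixB n b := by
  unfold prefixB
  by_cases hbn : b ≤ n
  · rw [if_pos (by omega), if_pos hbn]
    nlinarith [mul_nonneg (by omega : (0:Int) ≤ b - a) (by omega : (0:Int) ≤ 2 * n + a + b)]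
  · by_cases han : a ≤ n
    · rw [if_pos han, if_neg (by omega)]
      nlinarith [mul_nonneg (by omega : (0:Int) ≤ n - a) (by omega : (0:Int) ≤ 3 * n + a),
                 mul_nonneg (by omega : (0:Int) ≤ b - n) (by omega : (0:Int) ≤ 5 * n - b)]
    · rw [if_neg (by omega), if_neg (by omega)]
      nlinarith [mul_nonneg (by omega : (0:Int) ≤ b - a) (by omega : (0:Int) ≤ 6 * n - a - b)]

lemma prefix_2n {n : Int} (hn : 1 ≤ n) : prefixB n (2 * n) = 6 * n * n := by
  unfold prefixB; rw [if_neg (by omega)]; ring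

-- the linear index of an in-range cell lies in [1, 6 n²]
lemma t_bounds {n r p : Int} (hn : 1 ≤ n) (h1 : 1 ≤ r) (h2 : r ≤ 2 * n)
    (hp1 : 1 ≤ p) (hp2 : p ≤ cellsB n r) :
    1 ≤ prefixB n (r - 1) + p ∧ prefixB n (r - 1) + p ≤ 6 * n * n := by
  have hm0 : prefixB n 0 ≤ prefixB n (r - 1) :=
    prefix_mono (a := 0) (b := r - 1) hn le_rfl (by omega) (by omega)
  have hrec := prefix_rec (n := n) h1
  have hm2 : prefixB n r ≤ prefixB n (2 * n) :=
    prefix_mono (a := r) (b := 2 * n) hn (by omega) h2 le_rfl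
  rw [prefix_zero hn] at hm0
  rw [prefix_2n hn] at hm2
  omega

-- injectivity of the (row, pos) ↦ linear index map on the grid
lemma index_inj {n a b p q : Int} (hn : 1 ≤ n)
    (ha1 : 1 ≤ a) (ha2 : a ≤ 2 * n) (hp1 : 1 ≤ p) (hp2 : p ≤ cellsB n a)
    (hb1 : 1 ≤ b) (hb2 : b ≤ 2 * n) (hq1 : 1 ≤ q) (hq2 : q ≤ cellsB n b)
    (heq : prefixB n (a - 1) + p = prefixB n (b - 1) + q) : a = b ∧ p = q := by
  rcases lt_trichotomy a b with h | h | h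
  · exfalso
    have h1 : prefixB n a ≤ prefixB n (b - 1) :=
      prefix_mono (a := a) (b := b - 1) hn (by omega) (by omega) (by omega)
    have h2 := prefix_rec (n := n) ha1
    omega
  · subst h; exact ⟨rfl, by omega⟩
  · exfalso
    have h1 : prefixB n b ≤ prefixB n (a - 1) :=
      prefix_mono (a := b) (b := a - 1) hn (by omega) (by omega) (by omega)
    have h2 := prefix_rec (n := n) hb1
    omega

-- the loop finds an in-range target lying strictly ahead of the scan position
lemma ibpAux_some (row position n : Int) (hn : 1 ≤ n)
    (hr1 : 1 ≤ row) (hr2 : row ≤ 2 * n) (hp1 : 1 ≤ position) (hp2 : position ≤ cellsB n row) :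
    ∀ (fuel : Nat) (idx pos r cells : Int), 1 ≤ r → r ≤ 2 * n → cells = cellsB n r →
      1 ≤ pos → pos ≤ cells → idx = prefixB n (r - 1) + pos →
      idx < prefixB n (row - 1) + position →
      prefixB n (row - 1) + position - idx ≤ (fuel : Int) →
      ibpAux row position n fuel idx pos r cells = some (prefixB n (row - 1) + position) := by
  intro fuel
  induction fuel with
  | zero => intro idx pos r cells _ _ _ _ _ _ hlt hfuel; simp at hfuel; omega
  | succ fuel ih =>
    intro idx pos r cells hrr1 hrr2 hc hpp1 hpp2 hidx hlt hfuel
    have hrec := prefix_rec (n := n) hrr1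
    have ht := t_bounds hn hr1 hr2 hp1 hp2
    by_cases hreset : pos + 1 > cells
    · -- pos = cells: row change
      have hpos : pos = cells := by omega
      have hr2n : r < 2 * n := by
        rcases eq_or_lt_of_le hrr2 with h | h
        · exfalso
          have hi : idx = prefixB n r := by omega
          rw [h, prefix_2n hn] at hi
          omega
        · exact h
      have hc' : (if r + 1 ≤ n then cells + 2 else if r + 1 ≠ n + 1 then cells - 2 else cells)
          = cellsB n (r + 1) := by rw [hc]; exact cells_step
      have hcp : 1 ≤ cellsB n (r + 1) := cells_pos hn (by omega) (by omega)
      have hidx' : idx + 1 = prefixB n (r + 1 - 1) + 1 := by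
        rw [show r + 1 - 1 = r by ring]; omega
      rw [ibpAux, if_pos hreset]
      by_cases hhit : r + 1 = row ∧ (1 : Int) = position
      · rw [if_pos hhit]
        have : idx + 1 = prefixB n (row - 1) + position := by
          rw [hidx', hhit.1, ← hhit.2]
        rw [this]
      · rw [if_neg hhit, hc']
        have hne : idx + 1 ≠ prefixB n (row - 1) + position := by
          intro he
          exact hhit (index_inj (a := r + 1) (b := row) (p := 1) (q := position) hn
            (by omega) (by omega) le_rfl hcp hr1 hr2 hp1 hp2 (by omega))
        exact ih (idx + 1) 1 (r + 1) (cellsB n (r + 1)) (by omega) (by omega) rfl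
          le_rfl hcp hidx' (by omega) (by push_cast at hfuel ⊢; omega)
    · -- same row
      rw [ibpAux, if_neg hreset]
      by_cases hhit : r = row ∧ pos + 1 = position
      · rw [if_pos hhit]
        have : idx + 1 = prefixB n (row - 1) + position := by
          rw [← hhit.1, ← hhit.2]; omega
        rw [this]
      · rw [if_neg hhit]
        have hne : idx + 1 ≠ prefixB n (row - 1) + position := by
          intro he
          exact hhit (index_inj (a := r) (b := row) (p := pos + 1) (q := position) hn
            hrr1 hrr2 (by omega) (by omega) hr1 hr2 hp1 hp2 (by omega))
        exact ih (idx + 1) (pos + 1) r cells hrr1 hrr2 hc (by omega) (by omega)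
          (by omega) (by omega) (by push_cast at hfuel ⊢; omega)

-- the loop never reports an out-of-range target
lemma ibpAux_none (row position n : Int) (hn : 1 ≤ n)
    (hout : ¬(1 ≤ row ∧ row ≤ 2 * n ∧ 1 ≤ position ∧ position ≤ cellsB n row)) :
    ∀ (fuel : Nat) (idx pos r cells : Int), 1 ≤ r → r ≤ 2 * n → cells = cellsB n r →
      1 ≤ pos → pos ≤ cells → idx = prefixB n (r - 1) + pos →
      (fuel : Int) ≤ 6 * n * n - idx →
      ibpAux row position n fuel idx pos r cells = none := by
  intro fuel
  induction fuel with
  | zero => intro _ _ _ _ _ _ _ _ _ _ _; rfl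
  | succ fuel ih =>
    intro idx pos r cells hrr1 hrr2 hc hpp1 hpp2 hidx hfuel
    have hrec := prefix_rec (n := n) hrr1
    by_cases hreset : pos + 1 > cells
    · have hpos : pos = cells := by omega
      have hr2n : r < 2 * n := by
        rcases eq_or_lt_of_le hrr2 with h | h
        · exfalso
          have hi : idx = prefixB n r := by omega
          rw [h, prefix_2n hn] at hi
          push_cast at hfuel; omega
        · exact h
      have hc' : (if r + 1 ≤ n then cells + 2 else if r + 1 ≠ n + 1 then cells - 2 else cells)
          = cellsB n (r + 1) := by rw [hc]; exact cells_step
      have hcp : 1 ≤ cellsB n (r + 1) := cells_pos hn (by omega) (by omega)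
      have hhit : ¬(r + 1 = row ∧ (1 : Int) = position) := by
        intro ⟨h1, h2⟩
        exact hout ⟨by omega, by omega, by omega, by rw [← h1, ← h2]; exact hcp⟩
      rw [ibpAux, if_pos hreset, if_neg hhit, hc']
      exact ih (idx + 1) 1 (r + 1) (cellsB n (r + 1)) (by omega) (by omega) rfl
        le_rfl hcp (by rw [show r + 1 - 1 = r by ring]; omega)
        (by push_cast at hfuel ⊢; omega)
    · have hhit : ¬(r = row ∧ pos + 1 = position) := by
        intro ⟨h1, h2⟩
        exact hout ⟨by omega, by omega, by omega, by rw [← h1, ← h2]; omega⟩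
      rw [ibpAux, if_neg hreset, if_neg hhit]
      exact ih (idx + 1) (pos + 1) r cells hrr1 hrr2 hc (by omega) (by omega)
        (by omega) (by push_cast at hfuel ⊢; omega)

lemma cells_one {n : Int} (hn : 1 ≤ n) : cellsB n 1 = 2 * n + 1 := by
  unfold cellsB; rw [if_pos hn]; ring

-- the simulated scan agrees with the closed-form lookup
lemma ibp_eq (row position n : Int) (hn : 1 ≤ n) :
    index_by_position row position n = indexB n row position := by
  have hc1 := cells_one (n := n) hn
  have hp0 := prefix_zero (n := n) hn
  by_cases hin : 1 ≤ row ∧ row ≤ 2 * n ∧ 1 ≤ position ∧ position ≤ cellsB n row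
  · obtain ⟨hr1, hr2, hq1, hq2⟩ := hin
    have hB : indexB n row position = some (prefixB n (row - 1) + position) := by
      unfold indexB; rw [if_pos ⟨hr1, hr2, hq1, hq2⟩]
    rw [hB]
    unfold index_by_position
    by_cases h11 : (1 : Int) = row ∧ (1 : Int) = position
    · rw [if_pos h11, ← h11.1, ← h11.2, show (1:Int) - 1 = 0 by ring, hp0]
      norm_num
    · rw [if_neg h11]
      have ht := t_bounds hn hr1 hr2 hq1 hq2
      have hgt : 1 < prefixB n (row - 1) + position := by
        rcases eq_or_lt_of_le hr1 with h | h
        · have h0 : prefixB n (row - 1) = 0 := by rw [← h]; simpa using hp0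
          omega
        · have hm : prefixB n 1 ≤ prefixB n (row - 1) :=
            prefix_mono (a := 1) (b := row - 1) hn (by omega) (by omega) (by omega)
          have h1 := prefix_rec (n := n) (le_refl 1)
          rw [show (1:Int) - 1 = 0 by ring, hp0, hc1] at h1
          omega
      refine ibpAux_some row position n hn hr1 hr2 hq1 hq2 _ 1 1 1 (n * 2 + 1)
        le_rfl (by omega) (by rw [hc1]; ring) le_rfl (by omega) ?_ hgt ?_
      · rw [show (1:Int) - 1 = 0 by ring, hp0]; omega
      · rw [Int.toNat_of_nonneg (by nlinarith)]; linarith [ht.2]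
  · have hB : indexB n row position = none := by unfold indexB; rw [if_neg hin]
    rw [hB]
    unfold index_by_position
    have h11 : ¬((1 : Int) = row ∧ (1 : Int) = position) := by
      intro ⟨h1, h2⟩
      exact hin ⟨by omega, by omega, by omega, by rw [← h1, ← h2, hc1]; omega⟩
    rw [if_neg h11]
    refine ibpAux_none row position n hn hin _ 1 1 1 (n * 2 + 1)
      le_rfl (by omega) (by rw [hc1]; ring) le_rfl (by omega) ?_ ?_
    · rw [show (1:Int) - 1 = 0 by ring, hp0]; omega
    · rw [Int.toNat_of_nonneg (by nlinarith)]; linarith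

-- ===== VERDICT (by name: the statement is the Claim_ definition above) =====
theorem get_avoid_indexes_spec : Claim_equal_get_avoid_indexes := by
  intro n _ hn
  unfold Spec_get_avoid_indexes get_avoid_indexes get_avoid_indexes_alt
  rw [PySem.List.foldl_append_singleton_eq_map]
  simp only [List.nil_append]
  exact List.map_congr_left (fun rp _ => ibp_eq rp.1 rp.2 n hn)
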